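-- pv_equiv track=rewrite | github.com/phamhung075/dhafnck_mcp | dhafnck_mcp_main/src/fastmcp/task_management/infrastructure/services/legacy/project_analyzer/context_generator.py | _get_pattern_specific_guidance
-- ===== SOURCE A (Python) =====
-- from typing import Dict, List
--
-- def _get_pattern_specific_guidance(phase: str, patterns: List[str]) -> List[str]:
--     """Get guidance specific to detected project patterns"""
--     guidance = []
--
--     # Python-specific guidance
--     if any("Python" in pattern for pattern in patterns):
--         if phase == "coding":
--             guidance.extend([
--                 "- Follow Python PEP 8 style guidelines",
--                 "- Use type hints for better code clarity",
--                 "- Consider existing module structure for new code"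
--             ])
--         elif phase == "testing":
--             guidance.append("- Use pytest or unittest following project conventions")
--
--     # CLI-specific guidance
--     if any("CLI" in pattern for pattern in patterns):
--         if phase in ["coding", "planning"]:
--             guidance.extend([
--                 "- Maintain consistency with existing CLI patterns",
--                 "- Follow established command structure"
--             ])
--
--     # Dataclass-specific guidance
--     if any("Dataclass" in pattern for pattern in patterns):
--         if phase == "coding":
--             guidance.append("- Use dataclasses for data models following existing patterns")
--
--     # Architecture-specific guidance
--     if any("Modular" in pattern for pattern in patterns):
--         if phase in ["planning", "coding"]:
--             guidance.append("- Maintain modular architecture principles")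
--
--     # MCP-specific guidance
--     if any("MCP" in pattern for pattern in patterns):
--         if phase in ["planning", "coding"]:
--             guidance.append("- Follow MCP (Model Context Protocol) patterns and conventions")
--
--     return guidance
-- ===== SOURCE B (Python) =====
-- from typing import List
--
-- _KEYWORDS = ("Python", "CLI", "Dataclass", "Modular", "MCP")
--
-- # guidance grouped BY PHASE, in A's emission order within each phase
-- _PHASE_RULES = {
--     "coding": [
--         ("Python", ["- Follow Python PEP 8 style guidelines",
--                     "- Use type hints for better code clarity",
--                     "- Consider existing module structure for new code"]),
--         ("CLI", ["- Maintain consistency with existing CLI patterns",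
--                  "- Follow established command structure"]),
--         ("Dataclass", ["- Use dataclasses for data models following existing patterns"]),
--         ("Modular", ["- Maintain modular architecture principles"]),
--         ("MCP", ["- Follow MCP (Model Context Protocol) patterns and conventions"]),
--     ],
--     "testing": [
--         ("Python", ["- Use pytest or unittest following project conventions"]),
--     ],
--     "planning": [
--         ("CLI", ["- Maintain consistency with existing CLI patterns",
--                  "- Follow established command structure"]),
--         ("Modular", ["- Maintain modular architecture principles"]),
--         ("MCP", ["- Follow MCP (Model Context Protocol) patterns and conventions"]),
--     ],
-- }
--
-- def _get_pattern_specific_guidance(phase: str, patterns: List[str]) -> List[str]: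
--     """Single pass over patterns collecting present keywords, then a phase-keyed table lookup."""
--     found = set(kw for p in patterns for kw in _KEYWORDS if kw in p)
--     out: List[str] = []
--     for kw, lines in _PHASE_RULES.get(phase, []):
--         if kw in found:
--             out += lines
--     return out
-- ===== Notes on version B (the rewrite author's own statement) =====
-- stated objective: alternative
-- what changed: Instead of five separate scans of patterns (one per keyword) with inline per-keyword phase branches, B makes a single pass over patterns collecting the set of present keywords, then concatenates lines from a phase-keyed rule table for keywords in that set.
import Mathlib
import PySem

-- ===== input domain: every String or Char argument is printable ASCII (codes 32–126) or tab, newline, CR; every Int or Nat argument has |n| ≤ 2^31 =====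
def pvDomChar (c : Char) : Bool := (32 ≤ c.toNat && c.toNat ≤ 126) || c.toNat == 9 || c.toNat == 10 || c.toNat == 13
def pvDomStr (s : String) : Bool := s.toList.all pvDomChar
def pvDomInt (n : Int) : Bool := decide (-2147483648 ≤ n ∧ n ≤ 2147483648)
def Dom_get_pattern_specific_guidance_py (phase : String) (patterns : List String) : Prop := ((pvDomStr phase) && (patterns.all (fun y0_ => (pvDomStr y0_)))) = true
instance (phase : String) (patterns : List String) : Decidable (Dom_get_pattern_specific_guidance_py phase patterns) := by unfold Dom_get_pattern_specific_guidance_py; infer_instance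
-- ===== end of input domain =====

-- B replaces A's five per-keyword scans of patterns with one pass collecting present keywords plus a phase-keyed rule table (alternative decomposition; same cost).


-- ===== PORT A =====
def get_pattern_specific_guidance_py (phase : String) (patterns : List String) : List String :=
  let guidance : List String := []
  let guidance :=
    if patterns.any (fun pattern => PySem.Str.isIn "Python" pattern) then
      if phase == "coding" then
        guidance ++ ["- Follow Python PEP 8 style guidelines",
                     "- Use type hints for better code clarity",
                     "- Consider existing module structure for new code"]
      else if phase == "testing" then
        guidance ++ ["- Use pytest or unittest following project conventions"]
      else guidance
    else guidance
  let guidance :=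
    if patterns.any (fun pattern => PySem.Str.isIn "CLI" pattern) then
      if ["coding", "planning"].contains phase then
        guidance ++ ["- Maintain consistency with existing CLI patterns",
                     "- Follow established command structure"]
      else guidance
    else guidance
  let guidance :=
    if patterns.any (fun pattern => PySem.Str.isIn "Dataclass" pattern) then
      if phase == "coding" then
        guidance ++ ["- Use dataclasses for data models following existing patterns"]
      else guidance
    else guidance
  let guidance :=
    if patterns.any (fun pattern => PySem.Str.isIn "Modular" pattern) then
      if ["planning", "coding"].contains phase then
        guidance ++ ["- Maintain modular architecture principles"]
      else guidance
    else guidance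
  let guidance :=
    if patterns.any (fun pattern => PySem.Str.isIn "MCP" pattern) then
      if ["planning", "coding"].contains phase then
        guidance ++ ["- Follow MCP (Model Context Protocol) patterns and conventions"]
      else guidance
    else guidance
  guidance

-- ===== PORT B =====
def pvKeywords : List String := ["Python", "CLI", "Dataclass", "Modular", "MCP"]

def pvPhaseRules : PySem.Dict String (List (String × List String)) :=
  PySem.Dict.mk [ ("coding",
      [ ("Python", ["- Follow Python PEP 8 style guidelines",
                    "- Use type hints for better code clarity",
                    "- Consider existing module structure for new code"]),
        ("CLI", ["- Maintain consistency with existing CLI patterns",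
                 "- Follow established command structure"]),
        ("Dataclass", ["- Use dataclasses for data models following existing patterns"]),
        ("Modular", ["- Maintain modular architecture principles"]),
        ("MCP", ["- Follow MCP (Model Context Protocol) patterns and conventions"]) ]),
    ("testing",
      [ ("Python", ["- Use pytest or unittest following project conventions"]) ]),
    ("planning",
      [ ("CLI", ["- Maintain consistency with existing CLI patterns",
                 "- Follow established command structure"]),
        ("Modular", ["- Maintain modular architecture principles"]),
        ("MCP", ["- Follow MCP (Model Context Protocol) patterns and conventions"]) ]) ]

def get_pattern_specific_guidance_py_alt (phase : String) (patterns : List String) : List String :=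
  let found : PySem.Set String :=
    PySem.Set.ofList (patterns.flatMap (fun p => pvKeywords.filter (fun kw => PySem.Str.isIn kw p)))
  (PySem.Dict.getD pvPhaseRules phase []).foldl
    (fun out rule => if PySem.Set.contains found rule.1 then out ++ rule.2 else out) []

-- ===== PRECONDITION & SPEC =====
def Spec_get_pattern_specific_guidance_py (phase : String) (patterns : List String) (out : List String) : Prop := out = get_pattern_specific_guidance_py_alt phase patterns
instance (phase : String) (patterns : List String) (out : List String) : Decidable (Spec_get_pattern_specific_guidance_py phase patterns out) := by unfold Spec_get_pattern_specific_guidance_py; infer_instance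

-- ===== CLAIM (what is proved, stated in full; the proofs are below) =====
def Claim_equal_get_pattern_specific_guidance_py : Prop := ∀ (phase : String) (patterns : List String), Dom_get_pattern_specific_guidance_py phase patterns → Spec_get_pattern_specific_guidance_py phase patterns (get_pattern_specific_guidance_py phase patterns)

-- ===== LEMMAS AND PROOFS =====

-- membership in B's collected keyword set coincides with A's any-scan for that keyword
theorem pv_found_contains (patterns : List String) (kw : String) (hkw : kw ∈ pvKeywords) :
    PySem.Set.contains
      (PySem.Set.ofList (patterns.flatMap (fun p => pvKeywords.filter (fun kw => PySem.Str.isIn kw p)))) kw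
      = patterns.any (fun pattern => PySem.Str.isIn kw pattern) := by
  rw [Bool.eq_iff_iff, PySem.Set.contains_iff, List.any_eq_true]
  simp only [PySem.Set.mem_ofList, List.mem_flatMap, List.mem_filter]
  constructor
  · rintro ⟨p, hp, _, h⟩; exact ⟨p, hp, h⟩
  · rintro ⟨p, hp, h⟩; exact ⟨p, hp, hkw, h⟩

-- ===== VERDICT (by name: the statement is the Claim_ definition above) =====
set_option maxHeartbeats 2000000 in
theorem get_pattern_specific_guidance_py_spec : Claim_equal_get_pattern_specific_guidance_py := by
  intro phase patterns _
  unfold Spec_get_pattern_specific_guidance_py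
  have h1 := pv_found_contains patterns "Python" (by decide)
  have h2 := pv_found_contains patterns "CLI" (by decide)
  have h3 := pv_found_contains patterns "Dataclass" (by decide)
  have h4 := pv_found_contains patterns "Modular" (by decide)
  have h5 := pv_found_contains patterns "MCP" (by decide)
  by_cases hc : phase = "coding"
  · subst hc
    have hr : pvPhaseRules.getD "coding" [] = [("Python", ["- Follow Python PEP 8 style guidelines", "- Use type hints for better code clarity", "- Consider existing module structure for new code"]), ("CLI", ["- Maintain consistency with existing CLI patterns", "- Follow established command structure"]), ("Dataclass", ["- Use dataclasses for data models following existing patterns"]), ("Modular", ["- Maintain modular architecture principles"]), ("MCP", ["- Follow MCP (Model Context Protocol) patterns and conventions"])] := by rfl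
    simp only [get_pattern_specific_guidance_py, get_pattern_specific_guidance_py_alt, hr,
      List.foldl_cons, List.foldl_nil, h1, h2, h3, h4, h5]
    cases patterns.any (fun pattern => PySem.Str.isIn "Python" pattern) <;>
    cases patterns.any (fun pattern => PySem.Str.isIn "CLI" pattern) <;>
    cases patterns.any (fun pattern => PySem.Str.isIn "Dataclass" pattern) <;>
    cases patterns.any (fun pattern => PySem.Str.isIn "Modular" pattern) <;>
    cases patterns.any (fun pattern => PySem.Str.isIn "MCP" pattern) <;> rfl
  · by_cases ht : phase = "testing"
    · subst ht
      have hr : pvPhaseRules.getD "testing" [] = [("Python", ["- Use pytest or unittest following project conventions"])] := by rfl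
      simp only [get_pattern_specific_guidance_py, get_pattern_specific_guidance_py_alt, hr,
        List.foldl_cons, List.foldl_nil, h1, h2, h3, h4, h5]
      cases patterns.any (fun pattern => PySem.Str.isIn "Python" pattern) <;>
      cases patterns.any (fun pattern => PySem.Str.isIn "CLI" pattern) <;>
      cases patterns.any (fun pattern => PySem.Str.isIn "Dataclass" pattern) <;>
      cases patterns.any (fun pattern => PySem.Str.isIn "Modular" pattern) <;>
      cases patterns.any (fun pattern => PySem.Str.isIn "MCP" pattern) <;> rfl
    · by_cases hp : phase = "planning"
      · subst hp
        have hr : pvPhaseRules.getD "planning" [] = [("CLI", ["- Maintain consistency with existing CLI patterns", "- Follow established command structure"]), ("Modular", ["- Maintain modular architecture principles"]), ("MCP", ["- Follow MCP (Model Context Protocol) patterns and conventions"])] := by rfl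
        simp only [get_pattern_specific_guidance_py, get_pattern_specific_guidance_py_alt, hr,
          List.foldl_cons, List.foldl_nil, h1, h2, h3, h4, h5]
        cases patterns.any (fun pattern => PySem.Str.isIn "Python" pattern) <;>
        cases patterns.any (fun pattern => PySem.Str.isIn "CLI" pattern) <;>
        cases patterns.any (fun pattern => PySem.Str.isIn "Dataclass" pattern) <;>
        cases patterns.any (fun pattern => PySem.Str.isIn "Modular" pattern) <;>
        cases patterns.any (fun pattern => PySem.Str.isIn "MCP" pattern) <;> rfl
      · have hgd : pvPhaseRules.getD phase [] = [] := by
          simp [pvPhaseRules, PySem.Dict.getD_eq_get?_getD,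
                PySem.Dict.get?_mk_cons, beq_iff_eq, Ne.symm hc, Ne.symm ht, Ne.symm hp]
          rfl
        simp only [get_pattern_specific_guidance_py, get_pattern_specific_guidance_py_alt,
          hgd, List.foldl_nil]
        simp only [hc, ht, hp, if_neg, beq_iff_eq, List.contains_eq_mem,
          List.mem_cons, List.not_mem_nil, or_false, decide_eq_true_eq]
        cases patterns.any (fun pattern => PySem.Str.isIn "Python" pattern) <;>
        cases patterns.any (fun pattern => PySem.Str.isIn "CLI" pattern) <;>
        cases patterns.any (fun pattern => PySem.Str.isIn "Dataclass" pattern) <;>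
        cases patterns.any (fun pattern => PySem.Str.isIn "Modular" pattern) <;>
        cases patterns.any (fun pattern => PySem.Str.isIn "MCP" pattern) <;>
        rfl
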